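-- pv_equiv track=rewrite | github.com/DrunkJin/CosMos | 220926-221002/p70129/DrunkJin_p70129.py | solution
-- ===== SOURCE A (Python) =====
-- def solution(s):
--     answer = []
--     cnt = 0
--     zero = 0
--     while True:
--         if s == '1': # 1로 되면 로직정지
--             break
--         cnt += 1   # 사이클 횟수 추가
--         n = ''
--         for i in range(s.count('1')):   # 1의 갯수만큼 추가해서 만들어버림
--             n += '1'
--         zero += s.count('0') # 0의 개수를 저장`
--         s = str(bin(len(n))[2:]) # bin(숫자) -> 0b이진법 으로 변환되서 나옴
--
--     # 반복횟수랑 0제거갯수 저장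
--     answer.append(cnt)
--     answer.append(zero)
--
--     return answer
-- ===== SOURCE B (Python) =====
-- def solution(s):
--     # Bottom-up DP: tabulate, for every possible popcount value j up to k,
--     # the number of cycles and zeros removed by the chain starting at bin(j);
--     # then answer = first (string) cycle + table entry for k = s.count('1').
--     if s == '1':
--         return [0, 0]
--     k = s.count('1')
--     steps = [0] * (k + 1)
--     zeros = [0] * (k + 1)
--     for j in range(2, k + 1):
--         p = j.bit_count()
--         steps[j] = steps[p] + 1
--         zeros[j] = zeros[p] + j.bit_length() - p
--     return [steps[k] + 1, zeros[k] + s.count('0')]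
-- ===== Notes on version B (the rewrite author's own statement) =====
-- stated objective: alternative
-- what changed: B replaces A's chain-following while-loop (rebuild a string of ones, re-scan it, convert through bin() each cycle) by a bottom-up dynamic-programming table indexed by popcount value: it tabulates cycles and zeros-removed for every j up to the popcount k of the input in one for-loop and answers by a single table lookup plus the first string cycle.
import Mathlib
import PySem

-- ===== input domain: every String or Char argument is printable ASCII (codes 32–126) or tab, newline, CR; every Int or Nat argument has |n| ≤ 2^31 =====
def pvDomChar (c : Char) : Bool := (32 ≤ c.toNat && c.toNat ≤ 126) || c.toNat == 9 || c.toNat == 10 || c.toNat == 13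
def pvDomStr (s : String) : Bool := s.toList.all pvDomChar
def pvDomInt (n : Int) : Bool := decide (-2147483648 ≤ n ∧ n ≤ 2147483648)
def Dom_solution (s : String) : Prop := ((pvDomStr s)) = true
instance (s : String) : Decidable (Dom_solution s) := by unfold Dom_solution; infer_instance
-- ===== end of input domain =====

-- B replaces A's chain-following while-loop by a bottom-up DP table indexed by popcount
-- value, built once and read by a single lookup — objective: alternative.

-- Characterisation of Nat.toDigits 2 (the digit list of bin(n)[2:]), used by solLoop's
-- termination proof, which the port cites by name.
def pvBin (n : Nat) : List Char :=
  if _h : n < 2 then [Nat.digitChar n]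
  else pvBin (n / 2) ++ [Nat.digitChar (n % 2)]
decreasing_by exact Nat.div_lt_self (by omega) (by omega)

theorem pvBin_small (n : Nat) (h : n < 2) : pvBin n = [Nat.digitChar n] := by
  rw [pvBin]; simp [h]

theorem pvBin_step (n : Nat) (h : 2 ≤ n) : pvBin n = pvBin (n / 2) ++ [Nat.digitChar (n % 2)] := by
  rw [pvBin]; simp [Nat.not_lt.mpr h]

theorem pvBin_zero : pvBin 0 = ['0'] := by rw [pvBin_small 0 (by omega)]; decide
theorem pvBin_one : pvBin 1 = ['1'] := by rw [pvBin_small 1 (by omega)]; decide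

theorem toDigitsCore_two_eq_pvBin : ∀ (fuel n : Nat) (ds : List Char), n < fuel →
    Nat.toDigitsCore 2 fuel n ds = pvBin n ++ ds := by
  intro fuel
  induction fuel with
  | zero => intro n ds h; omega
  | succ f ih =>
    intro n ds h
    rw [Nat.toDigitsCore]
    by_cases h2 : n < 2
    · interval_cases n <;> simp [pvBin_zero, pvBin_one] <;> decide
    · have hn' : n / 2 ≠ 0 := by omega
      simp only [hn']
      rw [ih (n / 2) _ (by omega), pvBin_step n (by omega)]
      simp

theorem toDigits_two_eq_pvBin (n : Nat) : Nat.toDigits 2 n = pvBin n := by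
  rw [Nat.toDigits, toDigitsCore_two_eq_pvBin (n + 1) n [] (by omega), List.append_nil]

theorem count1_pvBin : ∀ (m : Nat), (pvBin m).count '1' = PySem.Int.bitCount (m : Int) := by
  intro m
  induction m using Nat.strong_induction_on with
  | _ m ih =>
    by_cases h2 : m < 2
    · interval_cases m
      · rw [pvBin_zero]; decide
      · rw [pvBin_one]; decide
    · rw [pvBin_step m (by omega), List.count_append,
        PySem.Int.bitCount_natCast (by omega : 0 < m),
        ih (m / 2) (Nat.div_lt_self (by omega) (by omega))]
      have hd : m % 2 = 0 ∨ m % 2 = 1 := by omega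
      rcases hd with h | h
      · rw [h, show List.count '1' [Nat.digitChar 0] = 0 from rfl]; omega
      · rw [h, show List.count '1' [Nat.digitChar 1] = 1 from rfl]; omega

theorem bitCount_le_self : ∀ (n : Nat), PySem.Int.bitCount (n : Int) ≤ n := by
  intro n
  induction n using Nat.strong_induction_on with
  | _ n ih =>
    by_cases h0 : n = 0
    · subst h0; decide
    · rw [PySem.Int.bitCount_natCast (by omega : 0 < n)]
      have := ih (n / 2) (Nat.div_lt_self (by omega) (by omega))
      omega

theorem bitCount_lt_self (m : Nat) (hm : 2 ≤ m) : PySem.Int.bitCount (m : Int) < m := by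
  rw [PySem.Int.bitCount_natCast (by omega : 0 < m)]
  have := bitCount_le_self (m / 2)
  omega

theorem length_foldl_append_one : ∀ (xs : List Int) (init : List Char),
    (xs.foldl (fun acc _ => acc ++ ['1']) init).length = init.length + xs.length := by
  intro xs
  induction xs with
  | nil => intro init; simp
  | cons x t ih => intro init; rw [List.foldl_cons, ih]; simp; omega

-- ===== PORT A =====
-- A's while loop; state (cnt, zero).  s.count('1') / s.count('0') are ported as
-- List.count on the char list (exact: the pattern is a single character).
-- The k = 0 branch is a totality guard only: there A's Python loops forever
-- (the digit string degenerates and the exit test never succeeds); those inputs are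
-- excluded by Pre_solution.
def solLoop (l : List Char) (cnt zero : Int) : Int × Int :=
  if l = ['1'] then (cnt, zero)
  else
    let k := l.count '1'
    if _hk : k = 0 then (cnt, zero)
    else
      -- n = '' ; for i in range(s.count('1')): n += '1'
      let n := (PySem.List.pyRange 0 (k : Int) 1).foldl (fun acc _ => acc ++ ['1']) ([] : List Char)
      -- s = str(bin(len(n))[2:])  (len(n) = k ≥ 1, so bin has no '-' and [2:] strips '0b')
      solLoop (Nat.toDigits 2 n.length) (cnt + 1) (zero + (l.count '0' : Int))
termination_by 2 * l.count '1' + (if l = ['1'] then 0 else 1)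
decreasing_by
  rename_i hne
  have hlen : ((PySem.List.pyRange 0 ((l.count '1' : Nat) : Int) 1).foldl
      (fun acc _ => acc ++ ['1']) ([] : List Char)).length = l.count '1' := by
    rw [length_foldl_append_one, PySem.List.length_pyRange_one]
    simp
  rw [hlen, toDigits_two_eq_pvBin, count1_pvBin, if_neg hne]
  by_cases h1 : l.count '1' = 1
  · rw [h1, if_pos pvBin_one]
    have e1 : PySem.Int.bitCount ((1 : Nat) : Int) = 1 := by decide
    rw [e1]; omega
  · have h2 : 2 ≤ l.count '1' := by omega
    have := bitCount_lt_self (l.count '1') h2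
    split <;> omega

def solution (s : String) : List Int :=
  let r := solLoop s.toList 0 0
  [r.1, r.2]

-- ===== PORT B =====
-- B's table step: the body of the for-loop over range(2, k+1) in Source B.
-- List reads steps[p]/zeros[p] use getD: the indices 1 <= p < j <= k are always
-- in range, so this is exact for Python's direct indexing.
def tstep (st : List Int × List Int) (j : Int) : List Int × List Int :=
  let p := PySem.Int.bitCount j
  (st.1.set j.toNat (st.1.getD p 0 + 1),
   st.2.set j.toNat (st.2.getD p 0 + ((PySem.Int.bitLength j : Int) - (p : Int))))

-- B's DP table: steps/zeros lists of length k+1, filled by folding tstep over range(2, k+1).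
def solution_alt (s : String) : List Int :=
  if s.toList = ['1'] then [0, 0]
  else
    let k := s.toList.count '1'
    let tbl := (PySem.List.pyRange 2 ((k : Int) + 1) 1).foldl tstep
      (List.replicate (k + 1) (0 : Int), List.replicate (k + 1) (0 : Int))
    [tbl.1.getD k 0 + 1, tbl.2.getD k 0 + (s.toList.count '0' : Int)]

-- ===== PRECONDITION & SPEC =====
-- Pre_ excludes exactly the strings in which the digit character 1 never occurs: on those
-- A's while-loop never terminates, so A returns no value there.
def Pre_solution (s : String) : Prop := '1' ∈ s.toList
instance (s : String) : Decidable (Pre_solution s) := by unfold Pre_solution; infer_instance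
def pvWitness_solution : String := "1011"

def Spec_solution (s : String) (out : List Int) : Prop := out = solution_alt s
instance (s : String) (out : List Int) : Decidable (Spec_solution s out) := by unfold Spec_solution; infer_instance

-- ===== CLAIM (what is proved, stated in full; the proofs are below) =====
def Claim_equal_solution : Prop := ∀ (s : String), Dom_solution s → Pre_solution s → Spec_solution s (solution s)

-- ===== LEMMAS AND PROOFS =====

-- The cycle/zeros pair of the chain starting at bin(k).
def chain (k : Nat) : Int × Int :=
  if _h : k ≤ 1 then (0, 0)
  else
    let p := PySem.Int.bitCount (k : Int)
    ((chain p).1 + 1, (chain p).2 + ((PySem.Int.bitLength (k : Int) : Int) - (p : Int)))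
termination_by k
decreasing_by exact bitCount_lt_self k (by omega)

theorem chain_small (k : Nat) (h : k ≤ 1) : chain k = (0, 0) := by rw [chain]; simp [h]

theorem chain_step (k : Nat) (h : 2 ≤ k) :
    chain k = ((chain (PySem.Int.bitCount (k : Int))).1 + 1,
      (chain (PySem.Int.bitCount (k : Int))).2 +
        ((PySem.Int.bitLength (k : Int) : Int) - (PySem.Int.bitCount (k : Int) : Int))) := by
  rw [chain]; simp [Nat.not_le.mpr (by omega : 1 < k)]

theorem bitCount_pos (m : Nat) (hm : 1 ≤ m) : 1 ≤ PySem.Int.bitCount (m : Int) := by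
  induction m using Nat.strong_induction_on with
  | _ m ih =>
    rw [PySem.Int.bitCount_natCast (by omega : 0 < m)]
    by_cases h2 : m < 2
    · have h1 : m = 1 := by omega
      subst h1; decide
    · have := ih (m / 2) (Nat.div_lt_self (by omega) (by omega)) (by omega)
      omega

theorem pvBin_ne_nil (m : Nat) : pvBin m ≠ [] := by
  by_cases h2 : m < 2
  · rw [pvBin_small m h2]; simp
  · rw [pvBin_step m (by omega)]; simp

theorem pvBin_eq_one_iff (m : Nat) : pvBin m = ['1'] ↔ m = 1 := by
  constructor
  · intro h
    by_cases h2 : m < 2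
    · interval_cases m
      · rw [pvBin_zero] at h; simp at h
      · rfl
    · exfalso
      rw [pvBin_step m (by omega)] at h
      have hnil := pvBin_ne_nil (m / 2)
      have hL := congrArg List.length h
      simp at hL
      exact hnil hL
  · intro h; subst h; exact pvBin_one

theorem count0_add_bitCount_pvBin : ∀ (m : Nat), 1 ≤ m →
    (pvBin m).count '0' + PySem.Int.bitCount (m : Int) = PySem.Int.bitLength (m : Int) := by
  intro m
  induction m using Nat.strong_induction_on with
  | _ m ih =>
    intro hm
    by_cases h2 : m < 2
    · interval_cases m; rw [pvBin_one]; decide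
    · rw [pvBin_step m (by omega), List.count_append,
        PySem.Int.bitCount_natCast (by omega : 0 < m),
        PySem.Int.bitLength_natCast (by omega : 0 < m)]
      have hrec := ih (m / 2) (Nat.div_lt_self (by omega) (by omega)) (by omega)
      have hd : m % 2 = 0 ∨ m % 2 = 1 := by omega
      rcases hd with h | h
      · rw [h, show List.count '0' [Nat.digitChar 0] = 1 from rfl]; omega
      · rw [h, show List.count '0' [Nat.digitChar 1] = 0 from rfl]; omega

theorem count0_pvBin_int (m : Nat) (hm : 1 ≤ m) :
    ((pvBin m).count '0' : Int) =
      (PySem.Int.bitLength (m : Int) : Int) - (PySem.Int.bitCount (m : Int) : Int) := by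
  have := count0_add_bitCount_pvBin m hm
  omega

-- A's loop computes exactly the chain pair.
theorem solLoop_pvBin_eq_chain : ∀ (k : Nat), 1 ≤ k → ∀ (cnt zero : Int),
    solLoop (pvBin k) cnt zero = (cnt + (chain k).1, zero + (chain k).2) := by
  intro k
  induction k using Nat.strong_induction_on with
  | _ k ih =>
    intro hk cnt zero
    rw [solLoop]
    by_cases h1 : k = 1
    · subst h1; simp [pvBin_one, chain_small 1 (by omega)]
    · have h2 : 2 ≤ k := by omega
      have hne : pvBin k ≠ ['1'] := by rw [Ne, pvBin_eq_one_iff]; exact h1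
      have hc1 : (pvBin k).count '1' = PySem.Int.bitCount (k : Int) := count1_pvBin k
      have hpos : 1 ≤ PySem.Int.bitCount (k : Int) := bitCount_pos k hk
      have hk0 : ¬ ((pvBin k).count '1' = 0) := by omega
      simp only [hne, if_neg, not_false_iff, hk0, dif_neg]
      have hlen : ((PySem.List.pyRange 0 (((pvBin k).count '1' : Nat) : Int) 1).foldl
          (fun acc _ => acc ++ ['1']) ([] : List Char)).length = (pvBin k).count '1' := by
        rw [length_foldl_append_one, PySem.List.length_pyRange_one]
        simp
      rw [hlen, toDigits_two_eq_pvBin, hc1,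
        ih (PySem.Int.bitCount (k : Int)) (bitCount_lt_self k h2) hpos,
        count0_pvBin_int k hk, chain_step k h2]
      simp [add_assoc, add_comm, add_left_comm]

theorem tbl_inv : ∀ (m N : Nat), 1 ≤ m → m < N →
    ((PySem.List.pyRange 2 ((m : Int) + 1) 1).foldl tstep
        (List.replicate N (0 : Int), List.replicate N (0 : Int))).1.length = N ∧
    ((PySem.List.pyRange 2 ((m : Int) + 1) 1).foldl tstep
        (List.replicate N (0 : Int), List.replicate N (0 : Int))).2.length = N ∧
    ∀ i : Nat, i ≤ m →
      ((PySem.List.pyRange 2 ((m : Int) + 1) 1).foldl tstep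
          (List.replicate N (0 : Int), List.replicate N (0 : Int))).1.getD i 0 = (chain i).1 ∧
      ((PySem.List.pyRange 2 ((m : Int) + 1) 1).foldl tstep
          (List.replicate N (0 : Int), List.replicate N (0 : Int))).2.getD i 0 = (chain i).2 := by
  intro m
  induction m with
  | zero => intro N h1; omega
  | succ n ih =>
    intro N _ hN
    by_cases hn : n = 0
    · subst hn
      rw [show ((1 : Nat) : Int) + 1 = 2 by norm_num, PySem.List.pyRange_one_eq_nil (by omega)]
      refine ⟨by simp, by simp, ?_⟩
      intro i hi
      interval_cases i <;>
        simp [chain_small 0 (by omega), chain_small 1 (by omega), List.getD]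
    · have hn1 : 1 ≤ n := by omega
      have hrw : ((n + 1 : Nat) : Int) + 1 = (((n : Int) + 1) + 1) := by push_cast; ring
      rw [hrw, PySem.List.pyRange_one_succ_right (by omega), List.foldl_append]
      obtain ⟨hL1, hL2, hent⟩ := ih N hn1 (by omega)
      set st := (PySem.List.pyRange 2 ((n : Int) + 1) 1).foldl tstep
        (List.replicate N (0 : Int), List.replicate N (0 : Int)) with hst
      have hj : ((n : Int) + 1) = ((n + 1 : Nat) : Int) := by push_cast; ring
      rw [List.foldl_cons, List.foldl_nil, hj]
      have h2 : 2 ≤ n + 1 := by omega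
      have hp1 : 1 ≤ PySem.Int.bitCount ((n + 1 : Nat) : Int) := bitCount_pos (n + 1) (by omega)
      have hp2 : PySem.Int.bitCount ((n + 1 : Nat) : Int) < n + 1 := bitCount_lt_self (n + 1) h2
      have htoNat : ((n + 1 : Nat) : Int).toNat = n + 1 := by omega
      obtain ⟨hep1, hep2⟩ := hent (PySem.Int.bitCount ((n + 1 : Nat) : Int)) (by omega)
      refine ⟨?_, ?_, ?_⟩
      · simp [tstep, hL1]
      · simp [tstep, hL2]
      · intro i hi
        by_cases hie : i = n + 1
        · subst hie
          constructor
          · simp only [tstep, htoNat]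
            rw [List.getD_eq_getElem?_getD, List.getElem?_set_self (by omega)]
            rw [hep1, chain_step (n + 1) h2]
            simp
          · simp only [tstep, htoNat]
            rw [List.getD_eq_getElem?_getD, List.getElem?_set_self (by omega)]
            rw [hep2, chain_step (n + 1) h2]
            simp
        · have hile : i ≤ n := by omega
          obtain ⟨he1, he2⟩ := hent i hile
          constructor
          · simp only [tstep, htoNat]
            rw [List.getD_eq_getElem?_getD, List.getElem?_set_ne (by omega),
              ← List.getD_eq_getElem?_getD]
            exact he1
          · simp only [tstep, htoNat]
            rw [List.getD_eq_getElem?_getD, List.getElem?_set_ne (by omega),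
              ← List.getD_eq_getElem?_getD]
            exact he2

-- ===== VERDICT (by name: the statement is the Claim_ definition above) =====
theorem solution_spec : Claim_equal_solution := by
  intro s _hdom hpre
  unfold Spec_solution solution solution_alt
  by_cases h1 : s.toList = ['1']
  · simp [solLoop, h1]
  · have hk : 1 ≤ s.toList.count '1' := List.count_pos_iff.mpr hpre
    rw [solLoop]
    have hk0 : ¬ (s.toList.count '1' = 0) := by omega
    simp only [h1, if_neg, not_false_iff, hk0, dif_neg]
    have hlen : ((PySem.List.pyRange 0 ((s.toList.count '1' : Nat) : Int) 1).foldl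
        (fun acc _ => acc ++ ['1']) ([] : List Char)).length = s.toList.count '1' := by
      rw [length_foldl_append_one, PySem.List.length_pyRange_one]
      simp
    rw [hlen, toDigits_two_eq_pvBin,
      solLoop_pvBin_eq_chain (s.toList.count '1') hk]
    obtain ⟨_, _, hent⟩ :=
      tbl_inv (s.toList.count '1') (s.toList.count '1' + 1) hk (by omega)
    obtain ⟨he1, he2⟩ := hent (s.toList.count '1') (le_refl _)
    rw [he1, he2]
    simp only [List.cons.injEq, and_true]
    constructor <;> omega
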